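-- pv_equiv track=rewrite | github.com/chandra447/flight-agent-bedrock | lambda_functions/travel_planner_agent/lambda_function.py | generate_travel_recommendations
-- ===== SOURCE A (Python) =====
-- from typing import Dict, Any, List
--
-- def generate_travel_recommendations(destination: str, duration: int, interests: List[str]) -> Dict:
--     """Generate travel recommendations based on parameters"""
--
--     recommendations = {
--         'packing_suggestions': [
--             'Comfortable walking shoes',
--             'Weather-appropriate clothing',
--             'Portable charger and adapters',
--             'First aid kit basics',
--             'Camera or smartphone for photos'
--         ],
--         'budget_tips': [
--             'Book flights and hotels in advance for better rates',
--             'Consider traveling during shoulder season',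
--             'Look for package deals combining multiple services',
--             'Use public transportation when possible',
--             'Try local restaurants for authentic and affordable meals'
--         ],
--         'activity_suggestions': []
--     }
--
--     # Add interest-based recommendations
--     if 'culture' in [i.lower() for i in interests]:
--         recommendations['activity_suggestions'].extend([
--             'Visit local museums and cultural sites',
--             'Attend traditional performances or festivals',
--             'Take a guided historical walking tour'
--         ])
--
--     if 'food' in [i.lower() for i in interests]:
--         recommendations['activity_suggestions'].extend([
--             'Try local specialties and street food',
--             'Take a cooking class',
--             'Visit local markets and food halls'
--         ])
--
--     if 'nature' in [i.lower() for i in interests]: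
--         recommendations['activity_suggestions'].extend([
--             'Explore parks and natural areas',
--             'Consider day trips to scenic locations',
--             'Look for hiking or outdoor activity opportunities'
--         ])
--
--     # Default activities if no specific interests
--     if not recommendations['activity_suggestions']:
--         recommendations['activity_suggestions'] = [
--             'Visit top-rated attractions and landmarks',
--             'Explore different neighborhoods',
--             'Try local cuisine and dining experiences',
--             'Take photos at scenic viewpoints',
--             'Shop for local souvenirs and crafts'
--         ]
--
--     return recommendations
-- ===== SOURCE B (Python) =====
-- def generate_travel_recommendations(destination, duration, interests):
--     """Generate travel recommendations (single pass over interests setting flags)."""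
--     table = [
--         ('culture', [
--             'Visit local museums and cultural sites',
--             'Attend traditional performances or festivals',
--             'Take a guided historical walking tour',
--         ]),
--         ('food', [
--             'Try local specialties and street food',
--             'Take a cooking class',
--             'Visit local markets and food halls',
--         ]),
--         ('nature', [
--             'Explore parks and natural areas',
--             'Consider day trips to scenic locations',
--             'Look for hiking or outdoor activity opportunities',
--         ]),
--     ]
--     index = {key: j for j, (key, _) in enumerate(table)}
--     flags = [False] * len(table)
--     for i in interests:
--         j = index.get(i.lower())
--         if j is not None:
--             flags[j] = True
--     activities = []
--     for flag, (_, suggestions) in zip(flags, table):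
--         if flag:
--             activities += suggestions
--     if not activities:
--         activities = [
--             'Visit top-rated attractions and landmarks',
--             'Explore different neighborhoods',
--             'Try local cuisine and dining experiences',
--             'Take photos at scenic viewpoints',
--             'Shop for local souvenirs and crafts',
--         ]
--     return {
--         'packing_suggestions': [
--             'Comfortable walking shoes',
--             'Weather-appropriate clothing',
--             'Portable charger and adapters',
--             'First aid kit basics',
--             'Camera or smartphone for photos',
--         ],
--         'budget_tips': [
--             'Book flights and hotels in advance for better rates',
--             'Consider traveling during shoulder season',
--             'Look for package deals combining multiple services',
--             'Use public transportation when possible',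
--             'Try local restaurants for authentic and affordable meals',
--         ],
--         'activity_suggestions': activities,
--     }
-- ===== Notes on version B (the rewrite author's own statement) =====
-- stated objective: alternative
-- what changed: Instead of A's three membership tests each rescanning a freshly lowered copy of interests, B makes one pass over interests setting per-keyword flags via a keyword->index dict, then concatenates the suggestion lists of flagged table rows; no membership test over interests remains (one scan instead of three).
import Mathlib
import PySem

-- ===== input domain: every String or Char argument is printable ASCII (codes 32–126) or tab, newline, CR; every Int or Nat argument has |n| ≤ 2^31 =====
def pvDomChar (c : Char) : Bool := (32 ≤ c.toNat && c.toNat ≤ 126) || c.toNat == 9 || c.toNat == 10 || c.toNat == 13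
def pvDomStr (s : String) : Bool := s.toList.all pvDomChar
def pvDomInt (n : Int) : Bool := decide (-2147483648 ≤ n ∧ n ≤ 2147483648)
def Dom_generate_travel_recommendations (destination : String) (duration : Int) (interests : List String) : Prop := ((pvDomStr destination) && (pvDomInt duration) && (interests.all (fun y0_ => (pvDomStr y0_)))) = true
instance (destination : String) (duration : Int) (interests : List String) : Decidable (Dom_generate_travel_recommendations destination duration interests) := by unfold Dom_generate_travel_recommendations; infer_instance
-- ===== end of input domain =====

-- B replaces A's three membership scans over the lowered interests by ONE pass over interests
-- that sets per-keyword flags via a keyword→index dict, then concatenates flagged table rows (alternative).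

-- ===== PORT A =====
def generate_travel_recommendations (destination : String) (duration : Int) (interests : List String) : List (String × List String) :=
  let recommendations : PySem.Dict String (List String) := PySem.Dict.ofList
    [ ("packing_suggestions",
       [ "Comfortable walking shoes"
       , "Weather-appropriate clothing"
       , "Portable charger and adapters"
       , "First aid kit basics"
       , "Camera or smartphone for photos" ])
    , ("budget_tips",
       [ "Book flights and hotels in advance for better rates"
       , "Consider traveling during shoulder season"
       , "Look for package deals combining multiple services"
       , "Use public transportation when possible"
       , "Try local restaurants for authentic and affordable meals" ])
    , ("activity_suggestions", []) ]
  let recommendations :=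
    if "culture" ∈ interests.map (fun i => PySem.Str.lower i) then
      recommendations.modify "activity_suggestions" [] (fun l => l ++
        [ "Visit local museums and cultural sites"
        , "Attend traditional performances or festivals"
        , "Take a guided historical walking tour" ])
    else recommendations
  let recommendations :=
    if "food" ∈ interests.map (fun i => PySem.Str.lower i) then
      recommendations.modify "activity_suggestions" [] (fun l => l ++
        [ "Try local specialties and street food"
        , "Take a cooking class"
        , "Visit local markets and food halls" ])
    else recommendations
  let recommendations :=
    if "nature" ∈ interests.map (fun i => PySem.Str.lower i) then
      recommendations.modify "activity_suggestions" [] (fun l => l ++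
        [ "Explore parks and natural areas"
        , "Consider day trips to scenic locations"
        , "Look for hiking or outdoor activity opportunities" ])
    else recommendations
  let recommendations :=
    if recommendations.getD "activity_suggestions" [] = [] then
      recommendations.insert "activity_suggestions"
        [ "Visit top-rated attractions and landmarks"
        , "Explore different neighborhoods"
        , "Try local cuisine and dining experiences"
        , "Take photos at scenic viewpoints"
        , "Shop for local souvenirs and crafts" ]
    else recommendations
  recommendations.items

-- ===== PORT B =====
def generate_travel_recommendations_alt (destination : String) (duration : Int) (interests : List String) : List (String × List String) :=
  let table : List (String × List String) :=
    [ ("culture",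
       [ "Visit local museums and cultural sites"
       , "Attend traditional performances or festivals"
       , "Take a guided historical walking tour" ])
    , ("food",
       [ "Try local specialties and street food"
       , "Take a cooking class"
       , "Visit local markets and food halls" ])
    , ("nature",
       [ "Explore parks and natural areas"
       , "Consider day trips to scenic locations"
       , "Look for hiking or outdoor activity opportunities" ]) ]
  let index : PySem.Dict String Int :=
    PySem.Dict.ofList ((PySem.List.enumerate table).map (fun p => (p.2.1, p.1)))
  let flags : List Bool := List.replicate table.length false
  let flags := interests.foldl (fun fl i =>
      match index.get? (PySem.Str.lower i) with
      -- flags[j] = True: j comes from `index`, so 0 ≤ j < 3 = flags length; List.set is exact here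
      | some j => fl.set j.toNat true
      | none => fl) flags
  let activities : List String :=
    (flags.zip table).foldl (fun acc p => if p.1 then acc ++ p.2.2 else acc) []
  let activities :=
    if activities = [] then
      [ "Visit top-rated attractions and landmarks"
      , "Explore different neighborhoods"
      , "Try local cuisine and dining experiences"
      , "Take photos at scenic viewpoints"
      , "Shop for local souvenirs and crafts" ]
    else activities
  [ ("packing_suggestions",
     [ "Comfortable walking shoes"
     , "Weather-appropriate clothing"
     , "Portable charger and adapters"
     , "First aid kit basics"
     , "Camera or smartphone for photos" ])
  , ("budget_tips",
     [ "Book flights and hotels in advance for better rates"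
     , "Consider traveling during shoulder season"
     , "Look for package deals combining multiple services"
     , "Use public transportation when possible"
     , "Try local restaurants for authentic and affordable meals" ])
  , ("activity_suggestions", activities) ]

-- ===== PRECONDITION & SPEC =====
def Spec_generate_travel_recommendations (destination : String) (duration : Int) (interests : List String) (out : List (String × List String)) : Prop := out = generate_travel_recommendations_alt destination duration interests
instance (destination : String) (duration : Int) (interests : List String) (out : List (String × List String)) : Decidable (Spec_generate_travel_recommendations destination duration interests out) := by unfold Spec_generate_travel_recommendations; infer_instance

-- ===== CLAIM (what is proved, stated in full; the proofs are below) =====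
def Claim_equal_generate_travel_recommendations : Prop := ∀ (destination : String) (duration : Int) (interests : List String), Dom_generate_travel_recommendations destination duration interests → Spec_generate_travel_recommendations destination duration interests (generate_travel_recommendations destination duration interests)

-- ===== LEMMAS AND PROOFS =====

-- B's keyword→index dict, evaluated on a closed key.
theorem pv_index_get (k : String) :
    (PySem.Dict.ofList ((PySem.List.enumerate
        ([ ("culture",
            [ "Visit local museums and cultural sites"
            , "Attend traditional performances or festivals"
            , "Take a guided historical walking tour" ])
         , ("food",
            [ "Try local specialties and street food"
            , "Take a cooking class"
            , "Visit local markets and food halls" ])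
         , ("nature",
            [ "Explore parks and natural areas"
            , "Consider day trips to scenic locations"
            , "Look for hiking or outdoor activity opportunities" ]) ] : List (String × List String))).map
          (fun p => (p.2.1, p.1)))).get? k
    = if k = "culture" then some 0 else if k = "food" then some 1
      else if k = "nature" then some 2 else none := by
  simp [PySem.List.enumerate, PySem.Dict.ofList, PySem.Dict.update, PySem.Dict.empty,
    PySem.Dict.get?, PySem.Dict.insert, List.find?]
  split_ifs <;> simp_all [eq_comm] <;> (repeat' split) <;> simp_all [beq_iff_eq]

-- B's flag loop computed in closed form: starting from flags [a,b,c], each flag ends as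
-- initial-value || "some interest lowers to the corresponding keyword".
theorem pv_flags_fold (l : List String) (a b c : Bool) :
    l.foldl (fun fl i =>
      match (PySem.Dict.ofList ((PySem.List.enumerate
        ([ ("culture",
            [ "Visit local museums and cultural sites"
            , "Attend traditional performances or festivals"
            , "Take a guided historical walking tour" ])
         , ("food",
            [ "Try local specialties and street food"
            , "Take a cooking class"
            , "Visit local markets and food halls" ])
         , ("nature",
            [ "Explore parks and natural areas"
            , "Consider day trips to scenic locations"
            , "Look for hiking or outdoor activity opportunities" ]) ] : List (String × List String))).map
          (fun p => (p.2.1, p.1)))).get? (PySem.Str.lower i) with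
      | some j => fl.set j.toNat true
      | none => fl) [a, b, c]
    = [ a || l.any (fun i => PySem.Str.lower i == "culture")
      , b || l.any (fun i => PySem.Str.lower i == "food")
      , c || l.any (fun i => PySem.Str.lower i == "nature") ] := by
  simp only [pv_index_get]
  induction l generalizing a b c with
  | nil => simp
  | cons x xs ih =>
    simp only [List.foldl_cons, List.any_cons]
    by_cases hc : PySem.Str.lower x = "culture"
    · simp [hc, ih]
    · by_cases hf : PySem.Str.lower x = "food"
      · simp [hf, ih]
      · by_cases hn : PySem.Str.lower x = "nature"
        · simp [hn, ih]
        · have h1 : (PySem.Str.lower x == "culture") = false := beq_eq_false_iff_ne.mpr hc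
          have h2 : (PySem.Str.lower x == "food") = false := beq_eq_false_iff_ne.mpr hf
          have h3 : (PySem.Str.lower x == "nature") = false := beq_eq_false_iff_ne.mpr hn
          simp [hc, hf, hn, ih, h1, h2, h3]

-- ===== VERDICT (by name: the statement is the Claim_ definition above) =====
theorem generate_travel_recommendations_spec : Claim_equal_generate_travel_recommendations := by
  intro destination duration interests _
  unfold Spec_generate_travel_recommendations generate_travel_recommendations generate_travel_recommendations_alt
  simp only [List.length_cons, List.length_nil, List.replicate]
  rw [pv_flags_fold]
  have hc' : ("culture" ∈ interests.map (fun i => PySem.Str.lower i)) ↔ ((interests.any fun i => PySem.Str.lower i == "culture") = true) := by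
    simp only [List.mem_map, List.any_eq_true, beq_iff_eq]
  have hf' : ("food" ∈ interests.map (fun i => PySem.Str.lower i)) ↔ ((interests.any fun i => PySem.Str.lower i == "food") = true) := by
    simp only [List.mem_map, List.any_eq_true, beq_iff_eq]
  have hn' : ("nature" ∈ interests.map (fun i => PySem.Str.lower i)) ↔ ((interests.any fun i => PySem.Str.lower i == "nature") = true) := by
    simp only [List.mem_map, List.any_eq_true, beq_iff_eq]
  by_cases hc : (interests.any fun i => PySem.Str.lower i == "culture") = true <;>
  by_cases hf : (interests.any fun i => PySem.Str.lower i == "food") = true <;>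
  by_cases hn : (interests.any fun i => PySem.Str.lower i == "nature") = true <;>
  simp only [List.zip, List.zipWith, List.foldl, Bool.false_or, hc', hf', hn', hc, hf, hn,
    if_false] <;> decide
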